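-- pv_equiv track=rewrite | github.com/netcon05/pyextralibs | math.py | get_prime_multipliers
-- ===== SOURCE A (Python) =====
-- def get_prime_multipliers(number: int) -> list:
--     """
--     Returns list of prime multipliers of given number
--     """
--     result: list[int] = []
--     multipliers = [2, 3, 5, 7]
--     multipliers.append(number)
--     while number > 1:
--         for i in multipliers:
--             if number % i == 0:
--                 result.append(i)
--                 number = int(number / i)
--                 multipliers[-1] = number
--                 break
--     return result
-- ===== SOURCE B (Python) =====
-- def get_prime_multipliers(number: int) -> list:
--     """
--     Returns list of prime multipliers of given number
--     """
--     result: list[int] = []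
--     for p in (2, 3, 5, 7):
--         while number % p == 0 and number > 1:
--             result.append(p)
--             number //= p
--     if number > 1:
--         result.append(number)
--     return result
-- ===== Notes on version B (the rewrite author's own statement) =====
-- stated objective: simpler
-- what changed: Replaces A's single while-loop that rescans a self-referential mutated [2,3,5,7,number] list and breaks on the first divisor with a plain outer loop over the fixed primes (2,3,5,7), an inner while that exhausts each prime with //, and one final cofactor append.
import Mathlib
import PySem

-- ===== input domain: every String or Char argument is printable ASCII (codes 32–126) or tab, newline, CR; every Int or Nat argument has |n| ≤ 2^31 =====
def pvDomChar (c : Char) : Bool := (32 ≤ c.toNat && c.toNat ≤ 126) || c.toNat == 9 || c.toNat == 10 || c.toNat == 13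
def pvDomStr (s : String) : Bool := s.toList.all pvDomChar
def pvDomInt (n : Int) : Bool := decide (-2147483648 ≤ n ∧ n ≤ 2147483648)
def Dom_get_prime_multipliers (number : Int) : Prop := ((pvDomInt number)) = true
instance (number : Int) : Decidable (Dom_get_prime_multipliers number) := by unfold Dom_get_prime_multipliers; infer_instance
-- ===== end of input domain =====

-- B replaces A's restart-from-the-top scan of a self-referential mutated list with a plain
-- outer loop over the fixed primes (2,3,5,7) plus one final cofactor append (objective: simpler).

-- ===== PORT A =====
-- A's while loop: `multipliers` is always exactly [2, 3, 5, 7, number] at the top of each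
-- iteration (only its last slot is ever rewritten, to the current `number`), so the loop state
-- is `number` alone and the `for i in multipliers: … break` scan is the if-chain below, in list
-- order. `int(number / i)` is ported as exact integer division, which it is here: it only runs
-- when i divides number, number > 1 and |number| ≤ 2^31, so the float quotient is exact.
def get_prime_multipliers_loop (number : Int) : List Int :=
  if _h1 : number > 1 then
    if h2 : number % 2 = 0 then 2 :: get_prime_multipliers_loop (number / 2)
    else if h3 : number % 3 = 0 then 3 :: get_prime_multipliers_loop (number / 3)
    else if h5 : number % 5 = 0 then 5 :: get_prime_multipliers_loop (number / 5)
    else if h7 : number % 7 = 0 then 7 :: get_prime_multipliers_loop (number / 7)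
    else if number % number = 0 then number :: get_prime_multipliers_loop (number / number)
    else []  -- unreachable: number % number = 0 for number > 1
  else []
termination_by number.toNat
decreasing_by
  · omega
  · omega
  · omega
  · omega
  · have : number / number = 1 := Int.ediv_self (by omega)
    omega

def get_prime_multipliers (number : Int) : List Int :=
  get_prime_multipliers_loop number

-- ===== PORT B =====
-- the inner `while number % p == 0 and number > 1: result.append(p); number //= p`;
-- the proof argument `hp : 2 ≤ p` only justifies termination (B calls it with p = 2,3,5,7).
-- Returns (the p's appended by this while, the remaining number).
def pvDivOut (p : Int) (hp : 2 ≤ p) (number : Int) : List Int × Int :=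
  if _h : PySem.Int.mod number p = 0 ∧ number > 1 then
    let s := pvDivOut p hp (PySem.Int.floordiv number p)
    (p :: s.1, s.2)
  else ([], number)
termination_by number.toNat
decreasing_by
  rw [PySem.Int.floordiv_eq_ediv_of_pos (by omega)]
  have hlt : number / p < number := by
    rw [Int.ediv_lt_iff_lt_mul (by omega)]; nlinarith [_h.2]
  omega

-- one iteration of B's `for p in (2, 3, 5, 7)`: thread (result, number) through the while for p
def pvThen (s : List Int × Int) (p : Int) (hp : 2 ≤ p) : List Int × Int :=
  ((s.1 ++ (pvDivOut p hp s.2).1), (pvDivOut p hp s.2).2)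

-- the trailing `if number > 1: result.append(number)`
def pvCofactor (s : List Int × Int) : List Int :=
  if s.2 > 1 then s.1 ++ [s.2] else s.1

def get_prime_multipliers_alt (number : Int) : List Int :=
  pvCofactor (pvThen (pvThen (pvThen (pvDivOut 2 (by norm_num) number)
    3 (by norm_num)) 5 (by norm_num)) 7 (by norm_num))

-- ===== PRECONDITION & SPEC =====
def Spec_get_prime_multipliers (number : Int) (out : List Int) : Prop := out = get_prime_multipliers_alt number
instance (number : Int) (out : List Int) : Decidable (Spec_get_prime_multipliers number out) := by unfold Spec_get_prime_multipliers; infer_instance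

-- ===== CLAIM (what is proved, stated in full; the proofs are below) =====
def Claim_equal_get_prime_multipliers : Prop := ∀ (number : Int), Dom_get_prime_multipliers number → Spec_get_prime_multipliers number (get_prime_multipliers number)

-- ===== LEMMAS AND PROOFS =====

lemma pvDivOut_step (p : Int) (hp : 2 ≤ p) (n : Int) (h : n % p = 0 ∧ n > 1) :
    pvDivOut p hp n = ((p :: (pvDivOut p hp (n / p)).1), (pvDivOut p hp (n / p)).2) := by
  rw [pvDivOut]
  rw [PySem.Int.mod_eq_emod_of_pos (by omega), PySem.Int.floordiv_eq_ediv_of_pos (by omega)]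
  simp [h.1, h.2]

lemma pvDivOut_stop (p : Int) (hp : 2 ≤ p) (n : Int) (h : ¬ (n % p = 0 ∧ n > 1)) :
    pvDivOut p hp n = ([], n) := by
  rw [pvDivOut]
  rw [PySem.Int.mod_eq_emod_of_pos (by omega)]
  exact dif_neg h

lemma pvThen_cons (s : List Int × Int) (a p : Int) (hp : 2 ≤ p) :
    pvThen (a :: s.1, s.2) p hp = (a :: (pvThen s p hp).1, (pvThen s p hp).2) := by
  simp [pvThen]

lemma pvThen_nil (n p : Int) (hp : 2 ≤ p) :
    pvThen ([], n) p hp = pvDivOut p hp n := by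
  simp [pvThen]

lemma pvCofactor_cons (s : List Int × Int) (a : Int) :
    pvCofactor (a :: s.1, s.2) = a :: pvCofactor s := by
  unfold pvCofactor
  split <;> simp

lemma alt_le_one (n : Int) (h : ¬ n > 1) : get_prime_multipliers_alt n = [] := by
  unfold get_prime_multipliers_alt
  rw [pvDivOut_stop 2 (by norm_num) n (by omega), pvThen_nil,
      pvDivOut_stop 3 (by norm_num) n (by omega), pvThen_nil,
      pvDivOut_stop 5 (by norm_num) n (by omega), pvThen_nil,
      pvDivOut_stop 7 (by norm_num) n (by omega)]
  simp [pvCofactor, h]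

lemma alt_two (n : Int) (h1 : n > 1) (h2 : n % 2 = 0) :
    get_prime_multipliers_alt n = 2 :: get_prime_multipliers_alt (n / 2) := by
  unfold get_prime_multipliers_alt
  rw [pvDivOut_step 2 (by norm_num) n ⟨h2, h1⟩,
      pvThen_cons, pvThen_cons, pvThen_cons, pvCofactor_cons]

lemma alt_three (n : Int) (h1 : n > 1) (h2 : ¬ n % 2 = 0) (h3 : n % 3 = 0) :
    get_prime_multipliers_alt n = 3 :: get_prime_multipliers_alt (n / 3) := by
  have hk : n = 3 * (n / 3) := by omega
  unfold get_prime_multipliers_alt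
  rw [pvDivOut_stop 2 (by norm_num) n (by omega), pvThen_nil,
      pvDivOut_step 3 (by norm_num) n ⟨h3, h1⟩,
      pvThen_cons, pvThen_cons, pvCofactor_cons,
      pvDivOut_stop 2 (by norm_num) (n / 3) (by omega), pvThen_nil]

lemma alt_five (n : Int) (h1 : n > 1) (h2 : ¬ n % 2 = 0) (h3 : ¬ n % 3 = 0) (h5 : n % 5 = 0) :
    get_prime_multipliers_alt n = 5 :: get_prime_multipliers_alt (n / 5) := by
  have hk : n = 5 * (n / 5) := by omega
  unfold get_prime_multipliers_alt
  rw [pvDivOut_stop 2 (by norm_num) n (by omega), pvThen_nil,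
      pvDivOut_stop 3 (by norm_num) n (by omega), pvThen_nil,
      pvDivOut_step 5 (by norm_num) n ⟨h5, h1⟩,
      pvThen_cons, pvCofactor_cons,
      pvDivOut_stop 2 (by norm_num) (n / 5) (by omega), pvThen_nil,
      pvDivOut_stop 3 (by norm_num) (n / 5) (by omega), pvThen_nil]

lemma alt_seven (n : Int) (h1 : n > 1) (h2 : ¬ n % 2 = 0) (h3 : ¬ n % 3 = 0)
    (h5 : ¬ n % 5 = 0) (h7 : n % 7 = 0) :
    get_prime_multipliers_alt n = 7 :: get_prime_multipliers_alt (n / 7) := by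
  have hk : n = 7 * (n / 7) := by omega
  unfold get_prime_multipliers_alt
  rw [pvDivOut_stop 2 (by norm_num) n (by omega), pvThen_nil,
      pvDivOut_stop 3 (by norm_num) n (by omega), pvThen_nil,
      pvDivOut_stop 5 (by norm_num) n (by omega), pvThen_nil,
      pvDivOut_step 7 (by norm_num) n ⟨h7, h1⟩,
      pvCofactor_cons,
      pvDivOut_stop 2 (by norm_num) (n / 7) (by omega), pvThen_nil,
      pvDivOut_stop 3 (by norm_num) (n / 7) (by omega), pvThen_nil,
      pvDivOut_stop 5 (by norm_num) (n / 7) (by omega), pvThen_nil]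

lemma alt_cofactor (n : Int) (h1 : n > 1) (h2 : ¬ n % 2 = 0) (h3 : ¬ n % 3 = 0)
    (h5 : ¬ n % 5 = 0) (h7 : ¬ n % 7 = 0) :
    get_prime_multipliers_alt n = [n] := by
  unfold get_prime_multipliers_alt
  rw [pvDivOut_stop 2 (by norm_num) n (by omega), pvThen_nil,
      pvDivOut_stop 3 (by norm_num) n (by omega), pvThen_nil,
      pvDivOut_stop 5 (by norm_num) n (by omega), pvThen_nil,
      pvDivOut_stop 7 (by norm_num) n (by omega)]
  simp [pvCofactor, h1]

lemma loop_eq_alt (m : Nat) : ∀ n : Int, n.toNat ≤ m →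
    get_prime_multipliers_loop n = get_prime_multipliers_alt n := by
  induction m with
  | zero =>
    intro n hn
    rw [get_prime_multipliers_loop, alt_le_one n (by omega)]
    simp [show ¬ n > 1 by omega]
  | succ m ih =>
    intro n hn
    by_cases h1 : n > 1
    · rw [get_prime_multipliers_loop]
      by_cases h2 : n % 2 = 0
      · rw [alt_two n h1 h2, ih (n / 2) (by omega)]
        simp [h1, h2]
      · by_cases h3 : n % 3 = 0
        · rw [alt_three n h1 h2 h3, ih (n / 3) (by omega)]
          simp [h1, h2, h3]
        · by_cases h5 : n % 5 = 0
          · rw [alt_five n h1 h2 h3 h5, ih (n / 5) (by omega)]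
            simp [h1, h2, h3, h5]
          · by_cases h7 : n % 7 = 0
            · rw [alt_seven n h1 h2 h3 h5 h7, ih (n / 7) (by omega)]
              simp [h1, h2, h3, h5, h7]
            · have hd : n / n = 1 := Int.ediv_self (by omega)
              rw [alt_cofactor n h1 h2 h3 h5 h7]
              rw [get_prime_multipliers_loop]
              simp [h1, h2, h3, h5, h7, hd]
              rw [ih 1 (by omega), alt_le_one 1 (by norm_num)]
    · rw [get_prime_multipliers_loop, alt_le_one n h1]
      simp [h1]

-- ===== VERDICT (by name: the statement is the Claim_ definition above) =====
theorem get_prime_multipliers_spec : Claim_equal_get_prime_multipliers := by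
  intro n _
  unfold Spec_get_prime_multipliers get_prime_multipliers
  exact loop_eq_alt n.toNat n le_rfl
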